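-- pv_equiv track=rewrite | github.com/surajvkothari/Padlock-Web-Version | DES_Cipher.py | getSubKeys
-- ===== SOURCE A (Python) =====
-- def getSubKeys(c, d):
--     """ Returns the 16 sub-keys """
--
--     # The list of values to which the two halves of the key will be shifted by:
--     shifts = [1, 1, 2, 2, 2, 2, 2, 2, 1, 2, 2, 2, 2, 2, 2, 1]
--
--     # The 2d list stores the pairs of keys which have been shifted
--     subKeys = []
--
--     # Initialises the previous sub-keys to the initial separate halves of the key c and d
--     cPrev = c
--     dPrev = d
--
--     # Iterates over the given shift values
--     for s in shifts:
--         # Shifts the previous sub-keys by the shift value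
--         cNext = shiftItems(key=cPrev, shift=s)
--         dNext = shiftItems(key=dPrev, shift=s)
--
--         # Changes the previous sub-keys to the current ones
--         cPrev = cNext
--         dPrev = dNext
--
--         subKeys.append([cNext, dNext])
--
--     return subKeys
--
-- def shiftItems(key, shift):
--     """ Shifts the separate halves of the subkey by the shift value given """
--
--     # Creates a list of each bit from the binary key
--     key = list(key)
--
--     # Shifts (rotates) the key by the shift number
--     shiftedKey = key[shift:] + key[:shift]
--
--     # Joins the key into a string
--     subKey = "".join(shiftedKey)
--
--     return subKey
-- ===== SOURCE B (Python) =====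
-- def getSubKeys(c, d):
--     """ Returns the 16 sub-keys """
--     shifts = [1, 1, 2, 2, 2, 2, 2, 2, 1, 2, 2, 2, 2, 2, 2, 1]
--     return _build(c, d, shifts, 0)
--
--
-- def _build(c, d, shifts, total):
--     """ Recursively emits one sub-key pair per shift, carrying the running
--         cumulative offset from the ORIGINAL halves """
--     if not shifts:
--         return []
--     t = total + shifts[0]
--     return [[_rot(c, t), _rot(d, t)]] + _build(c, d, shifts[1:], t)
--
--
-- def _rot(key, n):
--     """ The left-rotation of key by n, built character by character:
--         position i of the result is key[(i + n) % len(key)] """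
--     L = len(key)
--     if L == 0:
--         return key
--     return "".join(key[(i + n) % L] for i in range(L))
-- ===== Notes on version B (the rewrite author's own statement) =====
-- stated objective: alternative
-- what changed: Replaces A's step-by-step threading of previous halves through slice-based shifts by a recursion over the shift list that carries only the cumulative offset and rebuilds each sub-key character by character from the ORIGINAL halves via modular indexing key[(i+t)%len].
import Mathlib
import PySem

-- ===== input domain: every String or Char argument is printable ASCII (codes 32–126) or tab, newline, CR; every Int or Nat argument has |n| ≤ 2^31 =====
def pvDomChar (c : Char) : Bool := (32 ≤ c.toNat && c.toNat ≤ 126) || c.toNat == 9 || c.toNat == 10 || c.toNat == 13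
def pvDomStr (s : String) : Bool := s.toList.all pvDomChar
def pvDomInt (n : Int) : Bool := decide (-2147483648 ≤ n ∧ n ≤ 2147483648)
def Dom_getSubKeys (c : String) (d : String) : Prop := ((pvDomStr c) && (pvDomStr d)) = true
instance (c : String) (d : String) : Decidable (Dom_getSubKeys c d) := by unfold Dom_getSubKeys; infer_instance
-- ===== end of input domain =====

-- B replaces A's step-by-step threading of the previous halves (slice-based shifts)
-- by a recursion over the shift list carrying only the cumulative offset, each
-- sub-key rebuilt character by character from the original halves by modular
-- indexing (objective: alternative decomposition, same cost).

-- ===== PORT A =====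
-- shiftItems(key, shift): list(key); key[shift:] + key[:shift]; "".join(...)
def shiftItems (key : String) (shift : Int) : String :=
  let l := key.toList
  String.ofList (PySem.List.slice l (some shift) none ++ PySem.List.slice l none (some shift))

def getSubKeys (c : String) (d : String) : List (List String) :=
  let shifts : List Int := [1, 1, 2, 2, 2, 2, 2, 2, 1, 2, 2, 2, 2, 2, 2, 1]
  (shifts.foldl (fun (st : List (List String) × String × String) s =>
      let cNext := shiftItems st.2.1 s
      let dNext := shiftItems st.2.2 s
      (st.1 ++ [[cNext, dNext]], cNext, dNext)) ([], c, d)).1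

-- ===== PORT B =====
-- _rot(key, n): "".join(key[(i + n) % L] for i in range(L)); the index (i+n)%L is
-- always a valid non-negative index here, so Python's key[...] is exactly getD.
def rotAlt (key : String) (n : Int) : String :=
  let l := key.toList
  let L := l.length
  if L = 0 then key
  else String.ofList ((List.range L).map (fun (i : Nat) =>
    l.getD (PySem.Int.mod (((i : Nat) : Int) + n) (L : Int)).toNat ' '))

-- _build(c, d, shifts, total): structural recursion on the shift list
def buildAlt (c : String) (d : String) : List Int → Int → List (List String)
  | [], _ => []
  | s :: rest, total =>
    let t := total + s
    [[rotAlt c t, rotAlt d t]] ++ buildAlt c d rest t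

def getSubKeys_alt (c : String) (d : String) : List (List String) :=
  buildAlt c d [1, 1, 2, 2, 2, 2, 2, 2, 1, 2, 2, 2, 2, 2, 2, 1] 0

-- ===== PRECONDITION & SPEC =====
def Spec_getSubKeys (c : String) (d : String) (out : List (List String)) : Prop := out = getSubKeys_alt c d
instance (c : String) (d : String) (out : List (List String)) : Decidable (Spec_getSubKeys c d out) := by unfold Spec_getSubKeys; infer_instance

-- ===== CLAIM (what is proved, stated in full; the proofs are below) =====
def Claim_equal_getSubKeys : Prop := ∀ (c : String) (d : String), Dom_getSubKeys c d → Spec_getSubKeys c d (getSubKeys c d)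

-- ===== LEMMAS AND PROOFS =====

-- key[n:] + key[:n] = rotate n, for the shift amounts A actually uses (n = 1, 2)
theorem dropTake_rot (l : List Char) (n : Nat) (h1 : 1 ≤ n) (h2 : n ≤ 2) :
    l.drop n ++ l.take n = l.rotate n := by
  match l with
  | [] => simp
  | [a] => interval_cases n <;> simp
  | a :: b :: t => rw [List.rotate_eq_drop_append_take (by simp; omega)]

theorem stepA1 (key : String) :
    shiftItems key 1 = String.ofList (key.toList.rotate 1) := by
  simp only [shiftItems]
  rw [PySem.List.slice_from _ (by norm_num), PySem.List.slice_to _ (by norm_num)]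
  simp only [Int.toNat_one]
  exact congrArg _ (dropTake_rot key.toList 1 (by norm_num) (by norm_num))

theorem stepA2 (key : String) :
    shiftItems key 2 = String.ofList (key.toList.rotate 2) := by
  simp only [shiftItems]
  rw [PySem.List.slice_from _ (by norm_num), PySem.List.slice_to _ (by norm_num)]
  rw [show ((2:Int).toNat) = 2 by rfl]
  exact congrArg _ (dropTake_rot key.toList 2 (by norm_num) (by norm_num))

-- B's character-by-character rotation equals List.rotate for a positive offset
theorem stepB (key : String) (t : Int) (ht : 0 < t) :
    rotAlt key t = String.ofList (key.toList.rotate t.toNat) := by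
  simp only [rotAlt]
  by_cases h : key.toList.length = 0
  · have hk : key = "" := by
      rcases key with ⟨data⟩
      simp_all
    simp [hk]
  · simp only [h, if_false]
    have hlen : 0 < key.toList.length := Nat.pos_of_ne_zero h
    congr 1
    apply List.ext_getElem
    · simp
    · intro i hi hi'
      simp only [List.getElem_map, List.getElem_range]
      have hi0 : i < key.toList.length := by simpa using hi
      have hlpos : (0 : Int) < (key.toList.length : Int) := by exact_mod_cast hlen
      rw [PySem.Int.mod_eq_emod_of_pos hlpos]
      have hmnn : 0 ≤ ((i : Int) + t) % (key.toList.length : Int) :=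
        Int.emod_nonneg _ (by omega)
      have htn : (((i : Int) + t) % (key.toList.length : Int)).toNat
          = (i + t.toNat) % key.toList.length := by
        have h2 : (((i + t.toNat) % key.toList.length : Nat) : Int)
            = ((i : Int) + t) % (key.toList.length : Int) := by
          push_cast [Int.toNat_of_nonneg (le_of_lt ht)]
          rfl
        omega
      have hidx : (i + t.toNat) % key.toList.length < key.toList.length :=
        Nat.mod_lt _ hlen
      rw [htn, List.getD_eq_getElem _ _ (by simpa using hidx)]
      rw [List.getElem_rotate]

-- ===== VERDICT (by name: the statement is the Claim_ definition above) =====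
theorem getSubKeys_spec : Claim_equal_getSubKeys := by
  intro c d _
  unfold Spec_getSubKeys getSubKeys getSubKeys_alt
  simp only [List.foldl]
  simp [buildAlt, stepA1, stepA2, stepB, String.toList_ofList, List.rotate_rotate]
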